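-- pv_equiv track=rewrite | github.com/jerthermit/ai-smarthome-energymonitoringapp | backend/app/telemetry/api.py | _normalize_device_ids
-- ===== SOURCE A (Python) =====
-- from typing import List, Optional
--
-- def _normalize_device_ids(device_ids: Optional[List[str]]) -> Optional[List[str]]:
--     """
--     Accept both repeated query params (?device_ids=a&device_ids=b) and
--     a single comma-separated value (?device_ids=a,b). Returns a flat list
--     or None.
--     """
--     if not device_ids:
--         return None
--     out: List[str] = []
--     for item in device_ids:
--         if item is None:
--             continue
--         parts = [p.strip() for p in item.split(",") if p.strip()]
--         out.extend(parts)
--     return out or None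
-- ===== SOURCE B (Python) =====
-- from typing import List, Optional
--
--
-- def _normalize_device_ids(device_ids: Optional[List[str]]) -> Optional[List[str]]:
--     if not device_ids:
--         return None
--     big = ",".join(device_ids)
--     parts = [p.strip() for p in big.split(",") if p.strip()]
--     return parts or None
-- ===== Notes on version B (the rewrite author's own statement) =====
-- stated objective: idiomatic
-- what changed: Instead of A's per-item split-and-extend loop, B joins all items into one comma-separated string and does a single split/strip/filter pass.
import Mathlib
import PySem

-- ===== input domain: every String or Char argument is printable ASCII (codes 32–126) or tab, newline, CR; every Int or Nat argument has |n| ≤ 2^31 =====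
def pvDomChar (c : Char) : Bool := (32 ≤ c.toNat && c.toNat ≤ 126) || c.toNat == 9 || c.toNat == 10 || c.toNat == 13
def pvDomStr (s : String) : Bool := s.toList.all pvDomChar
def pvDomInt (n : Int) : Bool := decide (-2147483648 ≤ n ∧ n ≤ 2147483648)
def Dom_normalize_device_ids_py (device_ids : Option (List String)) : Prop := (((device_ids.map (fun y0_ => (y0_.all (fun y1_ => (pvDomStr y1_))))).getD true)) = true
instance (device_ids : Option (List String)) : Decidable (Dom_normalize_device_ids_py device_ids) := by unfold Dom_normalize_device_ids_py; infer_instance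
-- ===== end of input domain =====

-- B replaces A's per-item split-and-extend loop by one join-then-single-split pass (idiomatic; same cost).

-- ===== PORT A =====
-- Python: [p.strip() for p in item.split(",") if p.strip()]
def pvSplitStrip (s : String) : List String :=
  (((PySem.Chars.splitOn s.toList [',']).map PySem.Chars.strip).filter (fun p => !p.isEmpty)).map String.ofList

def normalize_device_ids_py (device_ids : Option (List String)) : Option (List String) :=
  match device_ids with
  | none => none                     -- `if not device_ids` (None is falsy)
  | some ids =>
    if ids.isEmpty then none         -- `if not device_ids` ([] is falsy)
    else
      -- A's `if item is None: continue` can never fire on a list of strings; out.extend(parts) per item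
      let out : List String := ids.foldl (fun out item => out ++ pvSplitStrip item) []
      if out.isEmpty then none else some out   -- `return out or None`

-- ===== PORT B =====
def normalize_device_ids_py_alt (device_ids : Option (List String)) : Option (List String) :=
  match device_ids with
  | none => none
  | some ids =>
    if ids.isEmpty then none
    else
      let big : List Char := PySem.Chars.join [','] (ids.map String.toList)   -- ",".join(device_ids)
      -- [p.strip() for p in big.split(",") if p.strip()]
      let parts : List String :=
        (((PySem.Chars.splitOn big [',']).map PySem.Chars.strip).filter (fun p => !p.isEmpty)).map String.ofList
      if parts.isEmpty then none else some parts   -- `return parts or None`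

-- ===== PRECONDITION & SPEC =====
def Spec_normalize_device_ids_py (device_ids : Option (List String)) (out : Option (List String)) : Prop := out = normalize_device_ids_py_alt device_ids
instance (device_ids : Option (List String)) (out : Option (List String)) : Decidable (Spec_normalize_device_ids_py device_ids out) := by unfold Spec_normalize_device_ids_py; infer_instance

-- ===== CLAIM (what is proved, stated in full; the proofs are below) =====
def Claim_equal_normalize_device_ids_py : Prop := ∀ (device_ids : Option (List String)), Dom_normalize_device_ids_py device_ids → Spec_normalize_device_ids_py device_ids (normalize_device_ids_py device_ids)

-- ===== LEMMAS AND PROOFS =====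

theorem pvModifyHead_id {α : Type} (xs : List α) : List.modifyHead (fun x => x) xs = xs := by
  cases xs <;> simp

theorem pvModifyHead_comp {α : Type} (a : α) (ys : List α) (xs : List (List α)) :
    List.modifyHead (fun x => ys ++ [a] ++ x) xs = List.modifyHead ((fun x => ys ++ x) ∘ List.cons a) xs := by
  cases xs <;> simp

-- PySem's fueled splitOn on a one-character separator computes core `List.splitOn`.
theorem pvGo_spec (c : Char) (f : Nat) (l cur : List Char) (acc : List (List Char)) (h : l.length < f) :
    PySem.Chars.splitOn.go [c] f l cur acc
      = acc.reverse ++ (l.splitOn c).modifyHead (cur.reverse ++ ·) := by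
  induction f generalizing l cur acc with
  | zero => omega
  | succ f ih =>
    cases l with
    | nil => simp [PySem.Chars.splitOn.go, List.splitOn, List.splitOnP_nil]
    | cons d rest =>
      by_cases hd : d = c
      · subst hd
        simp only [PySem.Chars.splitOn.go, List.isPrefixOf, beq_self_eq_true, Bool.true_and,
          if_true]
        rw [ih _ _ _ (by simpa using Nat.lt_of_succ_lt_succ h)]
        simp only [List.splitOn, List.splitOnP_cons, beq_self_eq_true, if_true]
        simp [pvModifyHead_id]
      · have hpre : List.isPrefixOf [c] (d :: rest) = false := by
          simp [List.isPrefixOf]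
          exact fun hdc => absurd hdc.symm hd
        simp only [PySem.Chars.splitOn.go, hpre, if_false, Bool.false_eq_true]
        rw [ih _ _ _ (by simpa using Nat.lt_of_succ_lt_succ h)]
        have hc : (d == c) = false := by simpa using hd
        simp only [List.splitOn, List.splitOnP_cons, hc, if_false, Bool.false_eq_true,
          List.modifyHead_modifyHead, List.reverse_cons]
        rw [pvModifyHead_comp]

theorem pvSplitOn_single (c : Char) (l : List Char) :
    PySem.Chars.splitOn l [c] = l.splitOn c := by
  unfold PySem.Chars.splitOn
  rw [pvGo_spec c (l.length + 1) l [] [] (by omega)]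
  simp [pvModifyHead_id]

-- splitting the intercalation on the separator concatenates the per-item splits
theorem pvSplitOn_intercalate (c : Char) (ls : List (List Char)) (h : ls ≠ []) :
    ([c].intercalate ls).splitOn c = ls.flatMap (fun l => l.splitOn c) := by
  induction ls with
  | nil => exact absurd rfl h
  | cons x xs ih =>
    cases xs with
    | nil => simp [List.intercalate]
    | cons y ys =>
      have hstep : [c].intercalate (x :: y :: ys) = x ++ c :: [c].intercalate (y :: ys) := by
        simp [List.intercalate, List.intersperse]
      rw [hstep]
      show List.splitOnP (fun z => z == c) (x ++ c :: [c].intercalate (y :: ys)) = _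
      rw [List.splitOnP_append_cons _ _ _ c (by simp)]
      have := ih (by simp)
      simp only [List.splitOn] at this
      rw [this]
      simp [List.flatMap_cons, List.splitOn]

theorem pvMain (ids : List String) (h : ids ≠ []) :
    ids.foldl (fun out item => out ++ pvSplitStrip item) []
      = (((PySem.Chars.splitOn (PySem.Chars.join [','] (ids.map String.toList)) [',']).map
            PySem.Chars.strip).filter (fun p => !p.isEmpty)).map String.ofList := by
  rw [PySem.List.foldl_append_eq_flatMap]
  show ids.flatMap pvSplitStrip = _
  rw [PySem.Chars.join, pvSplitOn_single,
    pvSplitOn_intercalate ',' (ids.map String.toList) (by simpa using h)]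
  rw [List.flatMap_map, List.map_flatMap, List.filter_flatMap, List.map_flatMap]
  unfold pvSplitStrip
  simp only [pvSplitOn_single]

-- ===== VERDICT (by name: the statement is the Claim_ definition above) =====
theorem normalize_device_ids_py_spec : Claim_equal_normalize_device_ids_py := by
  intro ids _
  unfold Spec_normalize_device_ids_py normalize_device_ids_py normalize_device_ids_py_alt
  cases ids with
  | none => rfl
  | some l =>
    by_cases hl : l.isEmpty
    · simp [hl]
    · simp only [hl, if_false, Bool.false_eq_true]
      rw [pvMain l (by simpa [List.isEmpty_iff] using hl)]
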